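-- pv_equiv track=rewrite | github.com/Akmal-coder/homework | src/bank_utils.py | process_bank_operations
-- ===== SOURCE A (Python) =====
-- from typing import List, Dict, Any
-- from collections import Counter
--
-- def process_bank_operations(data: List[Dict[str, Any]], categories: List[str]) -> Dict[str, int]:
--     """
--     Подсчитывает количество операций, соответствующих каждой категории.
--
--     Категории — список строк, и поиск в описании осуществляется по вхождению подстроки (игнорируя регистр).
--
--     """
--     counts = Counter()
--     lower_categories = [c.lower() for c in categories]
--
--     for item in data:
--         desc = item.get("description", "").lower()
--         for cat_lower, cat_orig in zip(lower_categories, categories):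
--             if cat_lower in desc:
--                 counts[cat_orig] += 1
--                 break
--     return dict(counts)
-- ===== SOURCE B (Python) =====
-- def process_bank_operations(data, categories):
--     # Category-major elimination: each category in turn claims the remaining
--     # items it matches; earliest claimed data index fixes the output order.
--     remaining = [(i, item.get("description", "").lower()) for i, item in enumerate(data)]
--     entries = []
--     for cat in categories:
--         lo = cat.lower()
--         matched = [i for i, d in remaining if lo in d]
--         if matched:
--             entries.append((matched[0], cat, len(matched)))
--         remaining = [(i, d) for i, d in remaining if lo not in d]
--     entries.sort(key=lambda t: t[0])
--     return {cat: n for _, cat, n in entries}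
-- ===== Notes on version B (the rewrite author's own statement) =====
-- stated objective: alternative
-- what changed: B replaces A's item-major loop (scan the categories for each item, break on first match, increment a Counter) by a category-major elimination: each category in turn claims and removes the remaining items whose description contains it, recording (earliest claimed index, category, count), and the entries are sorted by earliest index to recover the dict's insertion order.
import Mathlib
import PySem

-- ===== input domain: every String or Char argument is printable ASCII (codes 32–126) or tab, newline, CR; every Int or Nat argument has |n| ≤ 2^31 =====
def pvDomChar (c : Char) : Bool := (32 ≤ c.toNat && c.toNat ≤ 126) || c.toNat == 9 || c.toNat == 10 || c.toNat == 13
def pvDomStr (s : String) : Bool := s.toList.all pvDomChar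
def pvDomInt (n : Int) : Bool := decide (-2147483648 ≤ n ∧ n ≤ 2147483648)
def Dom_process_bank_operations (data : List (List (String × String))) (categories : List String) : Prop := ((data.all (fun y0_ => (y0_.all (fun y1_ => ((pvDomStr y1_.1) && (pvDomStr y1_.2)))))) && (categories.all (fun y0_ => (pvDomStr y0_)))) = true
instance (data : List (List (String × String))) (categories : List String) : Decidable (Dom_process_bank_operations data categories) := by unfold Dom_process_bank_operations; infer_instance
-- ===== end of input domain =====

-- B replaces A's per-item scan over categories with a category-major elimination: each category in
-- turn claims and removes the remaining items it matches, and the entries are sorted by earliest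
-- claimed data index to recover the dict's insertion order (objective: alternative algorithm).

-- ===== PORT A =====
-- inner 'for cat_lower, cat_orig in zip(...): if cat_lower in desc: counts[cat_orig] += 1; break'
def pvAInner (counts : PySem.Dict String Int) (pairs : List (String × String)) (desc : String) : PySem.Dict String Int :=
  match pairs with
  | [] => counts
  | (lo, orig) :: rest =>
    if PySem.Str.isIn lo desc then counts.modify orig 0 (· + 1)
    else pvAInner counts rest desc

def process_bank_operations (data : List (List (String × String))) (categories : List String) : List (String × Int) :=
  let lower_categories := categories.map PySem.Str.lower
  let counts := data.foldl (fun counts item =>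
    pvAInner counts (lower_categories.zip categories)
      (PySem.Str.lower (PySem.Dict.getD (PySem.Dict.mk item) "description" ""))) PySem.Dict.empty
  counts.items

-- ===== PORT B =====
-- loop body: lo = cat.lower(); matched = [i for i, d in remaining if lo in d];
-- if matched: entries.append((matched[0], cat, len(matched))); remaining = [(i,d) ... if lo not in d]
def pvBLoop (st : List (Int × String × Int) × List (Int × String)) (cat : String) :
    List (Int × String × Int) × List (Int × String) :=
  let lo := PySem.Str.lower cat
  let matched := (st.2.filter (fun p => PySem.Str.isIn lo p.2)).map (·.1)
  let entries := match matched with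
    | [] => st.1
    | i :: _ => st.1 ++ [(i, cat, (matched.length : Int))]
  (entries, st.2.filter (fun p => !PySem.Str.isIn lo p.2))

def process_bank_operations_alt (data : List (List (String × String))) (categories : List String) : List (String × Int) :=
  let remaining := (PySem.List.enumerate data 0).map (fun p =>
    (p.1, PySem.Str.lower (PySem.Dict.getD (PySem.Dict.mk p.2) "description" "")))
  let st := categories.foldl pvBLoop ([], remaining)
  let entries := PySem.List.sorted st.1 (fun t => t.1)
  (entries.foldl (fun d t => d.insert t.2.1 t.2.2) PySem.Dict.empty).items

-- ===== PRECONDITION & SPEC =====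
def Spec_process_bank_operations (data : List (List (String × String))) (categories : List String) (out : List (String × Int)) : Prop := out = process_bank_operations_alt data categories
instance (data : List (List (String × String))) (categories : List String) (out : List (String × Int)) : Decidable (Spec_process_bank_operations data categories out) := by unfold Spec_process_bank_operations; infer_instance

-- ===== CLAIM (what is proved, stated in full; the proofs are below) =====
def Claim_equal_process_bank_operations : Prop := ∀ (data : List (List (String × String))) (categories : List String), Dom_process_bank_operations data categories → Spec_process_bank_operations data categories (process_bank_operations data categories)

-- ===== LEMMAS AND PROOFS =====

-- first category (string) whose lowercase is contained in d
def pvFm (cats : List String) (d : String) : Option String :=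
  cats.find? (fun c => PySem.Str.isIn (PySem.Str.lower c) d)

-- (index, first-matching category) pairs, in data order
def pvH (cats : List String) (rem : List (Int × String)) : List (Int × String) :=
  rem.filterMap (fun p => (pvFm cats p.2).map (fun c => (p.1, c)))

-- B's entries list, as a recursion over the categories
def pvCatEntries : List String → List (Int × String) → List (Int × String × Int)
  | [], _ => []
  | c :: cs, rem =>
    (match rem.filter (fun p => PySem.Str.isIn (PySem.Str.lower c) p.2) with
     | [] => ([] : List (Int × String × Int))
     | p :: t => [(p.1, c, ((p :: t).length : Int))]) ++
    pvCatEntries cs (rem.filter (fun p => !PySem.Str.isIn (PySem.Str.lower c) p.2))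

-- the same entries grouped in data order (first-occurrence grouping of the hit pairs);
-- fuel = list length, to keep the equations free of `attach`
def pvTF : Nat → List (Int × String) → List (Int × String × Int)
  | 0, _ => []
  | _ + 1, [] => []
  | n + 1, (i, k) :: t =>
    (i, k, (1 + ((t.filter (fun q => q.2 == k)).length : Int))) ::
      pvTF n (t.filter (fun q => !(q.2 == k)))

def pvT (hits : List (Int × String)) : List (Int × String × Int) := pvTF hits.length hits

theorem pvTF_congr : ∀ (n m : Nat) (l : List (Int × String)),
    l.length ≤ n → l.length ≤ m → pvTF n l = pvTF m l := by
  intro n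
  induction n with
  | zero =>
    intro m l h _
    have : l = [] := List.eq_nil_of_length_eq_zero (Nat.le_zero.mp h)
    subst this
    cases m <;> rfl
  | succ n ih =>
    intro m l h1 h2
    match l, m with
    | [], m => cases m <;> rfl
    | (i, k) :: t, m + 1 =>
      simp only [pvTF]
      congr 1
      have hf := List.length_filter_le (fun q => !(q.2 == k)) t
      simp only [List.length_cons] at h1 h2
      exact ih _ _ (by omega) (by omega)

theorem pvT_nil : pvT [] = [] := rfl

theorem pvT_cons (i : Int) (k : String) (t : List (Int × String)) :
    pvT ((i, k) :: t)
      = (i, k, (1 + ((t.filter (fun q => q.2 == k)).length : Int))) ::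
          pvT (t.filter (fun q => !(q.2 == k))) := by
  unfold pvT
  simp only [List.length_cons, pvTF]
  congr 1
  exact pvTF_congr _ _ _ (List.length_filter_le _ t) (Nat.le_refl _)

-- induction principle following pvT's recursion
theorem pvT_ind (P : List (Int × String) → Prop) (h0 : P [])
    (h1 : ∀ (i : Int) (k : String) (t : List (Int × String)),
      P (t.filter (fun q => !(q.2 == k))) → P ((i, k) :: t)) :
    ∀ l, P l := by
  intro l
  generalize hn : l.length = n
  induction n using Nat.strong_induction_on generalizing l with
  | _ n ih =>
    match l, hn with
    | [], _ => exact h0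
    | (i, k) :: t, hn =>
      refine h1 i k t (ih (t.filter (fun q => !(q.2 == k))).length ?_ _ rfl)
      have := List.length_filter_le (fun q => !(q.2 == k)) t
      simp only [List.length_cons] at hn
      omega

def pvEntryOfH (hits : List (Int × String)) (k : String) : Option (Int × String × Int) :=
  match hits.filter (fun q => q.2 == k) with
  | [] => none
  | q :: t => some (q.1, k, ((q :: t).length : Int))

def pvEntryOf (cats : List String) (rem : List (Int × String)) (c : String) : Option (Int × String × Int) :=
  match rem.filter (fun p => pvFm cats p.2 == some c) with
  | [] => none
  | p :: t => some (p.1, c, ((p :: t).length : Int))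

theorem pvFm_cons_pos {c d : String} (cs : List String)
    (h : PySem.Str.isIn (PySem.Str.lower c) d = true) : pvFm (c :: cs) d = some c := by
  unfold pvFm
  exact List.find?_cons_of_pos h

theorem pvFm_cons_neg {c d : String} (cs : List String)
    (h : PySem.Str.isIn (PySem.Str.lower c) d = false) : pvFm (c :: cs) d = pvFm cs d := by
  unfold pvFm
  exact List.find?_cons_of_neg (by rw [h]; simp)

theorem pvFm_some_isIn {cats : List String} {d c : String} (h : pvFm cats d = some c) :
    PySem.Str.isIn (PySem.Str.lower c) d = true := by
  unfold pvFm at h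
  exact List.find?_some (p := fun c => PySem.Str.isIn (PySem.Str.lower c) d) h

-- (a) the head category's group is exactly the matching remaining items
theorem pvFilter_head (c : String) (cs : List String) (rem : List (Int × String)) :
    rem.filter (fun p => pvFm (c :: cs) p.2 == some c)
      = rem.filter (fun p => PySem.Str.isIn (PySem.Str.lower c) p.2) := by
  apply List.filter_congr
  intro p _
  cases hin : PySem.Str.isIn (PySem.Str.lower c) p.2
  · rw [pvFm_cons_neg cs hin]
    cases hf : pvFm cs p.2 with
    | none => rfl
    | some c' =>
      have hne : c' ≠ c := by
        intro hc; subst hc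
        exact absurd (pvFm_some_isIn hf) (by rw [hin]; simp)
      simp [hne]
  · rw [pvFm_cons_pos cs hin]
    simp

-- (b) for another category the group lives in the filtered remainder
theorem pvFilter_tail {c c' : String} (hne : c' ≠ c) (cs : List String) (rem : List (Int × String)) :
    rem.filter (fun p => pvFm (c :: cs) p.2 == some c')
      = (rem.filter (fun p => !PySem.Str.isIn (PySem.Str.lower c) p.2)).filter
          (fun p => pvFm cs p.2 == some c') := by
  rw [List.filter_filter]
  apply List.filter_congr
  intro p _
  cases hin : PySem.Str.isIn (PySem.Str.lower c) p.2
  · rw [pvFm_cons_neg cs hin]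
    simp
  · rw [pvFm_cons_pos cs hin]
    simp [Ne.symm hne]

theorem pvEntryOf_nil (rem : List (Int × String)) (c : String) : pvEntryOf [] rem c = none := by
  unfold pvEntryOf
  have : rem.filter (fun p => pvFm [] p.2 == some c) = [] := by
    simp [pvFm, List.find?]
  rw [this]

theorem pvEntryOf_head (c : String) (cs : List String) (rem : List (Int × String)) :
    pvEntryOf (c :: cs) rem c
      = (match rem.filter (fun p => PySem.Str.isIn (PySem.Str.lower c) p.2) with
         | [] => none
         | p :: t => some (p.1, c, ((p :: t).length : Int))) := by
  unfold pvEntryOf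
  rw [pvFilter_head]

theorem pvEntryOf_tail {c c' : String} (hne : c' ≠ c) (cs : List String) (rem : List (Int × String)) :
    pvEntryOf (c :: cs) rem c'
      = pvEntryOf cs (rem.filter (fun p => !PySem.Str.isIn (PySem.Str.lower c) p.2)) c' := by
  unfold pvEntryOf
  rw [pvFilter_tail hne]

theorem pvEntryOf_some {cats : List String} {rem : List (Int × String)} {c : String}
    {e : Int × String × Int} (h : pvEntryOf cats rem c = some e) :
    e.2.1 = c ∧ ∃ p ∈ rem, pvFm cats p.2 = some c := by
  unfold pvEntryOf at h
  cases hf : rem.filter (fun p => pvFm cats p.2 == some c) with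
  | nil => rw [hf] at h; exact absurd h (by simp)
  | cons p t =>
    rw [hf] at h
    have hp : p ∈ rem.filter (fun p => pvFm cats p.2 == some c) := by
      rw [hf]; exact List.mem_cons_self
    have hfm := List.of_mem_filter hp
    refine ⟨by cases e with | mk a b => cases b; simp_all,
      p, List.mem_of_mem_filter hp, by simpa using hfm⟩

-- membership characterisation of B's entries
theorem pvMem_catEntries : ∀ (cs : List String) (rem : List (Int × String)) (e : Int × String × Int),
    e ∈ pvCatEntries cs rem ↔ ∃ c, pvEntryOf cs rem c = some e := by
  intro cs
  induction cs with
  | nil => intro rem e; simp [pvCatEntries, pvEntryOf_nil]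
  | cons c cs ih =>
    intro rem e
    unfold pvCatEntries
    rw [List.mem_append]
    constructor
    · rintro (he | he)
      · refine ⟨c, ?_⟩
        rw [pvEntryOf_head]
        cases hm : rem.filter (fun p => PySem.Str.isIn (PySem.Str.lower c) p.2) with
        | nil => rw [hm] at he; simp at he
        | cons p t => rw [hm] at he; simp at he; simp [he]
      · obtain ⟨c', hc'⟩ := (ih _ e).mp he
        have hne : c' ≠ c := by
          intro hcc; subst hcc
          obtain ⟨-, p, hp, hfm⟩ := pvEntryOf_some hc'
          have h1 := pvFm_some_isIn hfm
          have h2 := List.of_mem_filter hp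
          simp only [h1, Bool.not_true] at h2
          exact absurd h2 (by simp)
        exact ⟨c', by rw [pvEntryOf_tail hne]; exact hc'⟩
    · rintro ⟨c', hc'⟩
      by_cases hcc : c' = c
      · subst hcc
        rw [pvEntryOf_head] at hc'
        left
        cases hm : rem.filter (fun p => PySem.Str.isIn (PySem.Str.lower c') p.2) with
        | nil => rw [hm] at hc'; simp at hc'
        | cons p t => rw [hm] at hc'; simp at hc'; simp [hc']
      · rw [pvEntryOf_tail hcc] at hc'
        exact Or.inr ((ih _ e).mpr ⟨c', hc'⟩)

theorem pvEntryOfH_some {hits : List (Int × String)} {k : String}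
    {e : Int × String × Int} (h : pvEntryOfH hits k = some e) :
    e.2.1 = k ∧ ∃ q ∈ hits, q.2 = k ∧ e.1 = q.1 := by
  unfold pvEntryOfH at h
  cases hf : hits.filter (fun q => q.2 == k) with
  | nil => rw [hf] at h; exact absurd h (by simp)
  | cons q t =>
    rw [hf] at h
    have hq : q ∈ hits.filter (fun q => q.2 == k) := by
      rw [hf]; exact List.mem_cons_self
    have hqk := List.of_mem_filter hq
    refine ⟨by cases e with | mk a b => cases b; simp_all,
      q, List.mem_of_mem_filter hq, by simpa using hqk,
      by cases e with | mk a b => cases b; simp_all⟩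

theorem pvEntryOfH_cons_ne {k k' : String} (hne : k' ≠ k) (i : Int) (t : List (Int × String)) :
    pvEntryOfH ((i, k) :: t) k' = pvEntryOfH (t.filter (fun q => !(q.2 == k))) k' := by
  unfold pvEntryOfH
  have hstep : ((i, k) :: t).filter (fun q => q.2 == k')
      = (t.filter (fun q => !(q.2 == k))).filter (fun q => q.2 == k') := by
    rw [List.filter_filter, List.filter_cons]
    have hkk' : ((( i, k) : Int × String).2 == k') = false := by simp [Ne.symm hne]
    rw [hkk']
    simp only [Bool.false_eq_true, if_false]
    apply List.filter_congr
    intro q _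
    cases hq : (q.2 == k')
    · simp
    · have hq2 : q.2 = k' := by simpa using hq
      simp [hq2, hne]
  rw [hstep]

theorem pvEntryOfH_cons_self (i : Int) (k : String) (t : List (Int × String)) :
    pvEntryOfH ((i, k) :: t) k
      = some (i, k, (1 + ((t.filter (fun q => q.2 == k)).length : Int))) := by
  unfold pvEntryOfH
  rw [List.filter_cons]
  simp only [show (((i, k) : Int × String).2 == k) = true by simp, if_true]
  simp [add_comm]

-- membership characterisation of the grouped form
theorem pvMem_T : ∀ (hits : List (Int × String)) (e : Int × String × Int),
    e ∈ pvT hits ↔ ∃ k, pvEntryOfH hits k = some e := by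
  intro hits
  induction hits using pvT_ind with
  | h0 => intro e; simp [pvT_nil, pvEntryOfH]
  | h1 i k t ih =>
    intro e
    rw [pvT_cons, List.mem_cons]
    constructor
    · rintro (he | he)
      · exact ⟨k, by rw [pvEntryOfH_cons_self, he]⟩
      · obtain ⟨k', hk'⟩ := (ih e).mp he
        have hne : k' ≠ k := by
          obtain ⟨-, q, hq, hqk, -⟩ := pvEntryOfH_some hk'
          have hmem := List.of_mem_filter hq
          simp only [hqk] at hmem
          intro h
          rw [h] at hmem
          simp at hmem
        exact ⟨k', by rw [pvEntryOfH_cons_ne hne]; exact hk'⟩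
    · rintro ⟨k', hk'⟩
      by_cases hkk : k' = k
      · subst hkk
        rw [pvEntryOfH_cons_self] at hk'
        exact Or.inl (by simpa using hk'.symm)
      · rw [pvEntryOfH_cons_ne hkk] at hk'
        exact Or.inr ((ih e).mpr ⟨k', hk'⟩)

-- equality of the two entry functions, through the hit pairs
theorem pvH_filter (cats : List String) (rem : List (Int × String)) (c : String) :
    (pvH cats rem).filter (fun q => q.2 == c)
      = (rem.filter (fun p => pvFm cats p.2 == some c)).map (fun p => (p.1, c)) := by
  induction rem with
  | nil => rfl
  | cons p rem ih =>
    unfold pvH at *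
    rw [List.filterMap_cons, List.filter_cons]
    cases hf : pvFm cats p.2 with
    | none => simp [hf, ih]
    | some c' =>
      by_cases hcc : c' = c
      · subst hcc
        simp [hf, List.filter_cons, ih]
      · simp [hf, List.filter_cons, hcc, ih, Ne.symm hcc]

theorem pvEntryOf_eq_entryOfH (cats : List String) (rem : List (Int × String)) (c : String) :
    pvEntryOf cats rem c = pvEntryOfH (pvH cats rem) c := by
  unfold pvEntryOf pvEntryOfH
  rw [pvH_filter]
  cases hf : rem.filter (fun p => pvFm cats p.2 == some c) with
  | nil => rfl
  | cons p t => simp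

-- Nodup of the key lists
theorem pvNodup_keys_T : ∀ (hits : List (Int × String)), ((pvT hits).map (fun e => e.2.1)).Nodup := by
  intro hits
  induction hits using pvT_ind with
  | h0 => simp [pvT_nil]
  | h1 i k t ih =>
    rw [pvT_cons, List.map_cons]
    refine List.Nodup.cons ?_ ih
    intro hk
    obtain ⟨e, he, hek⟩ := List.mem_map.mp hk
    obtain ⟨k', hk'⟩ := (pvMem_T _ e).mp he
    obtain ⟨hek', q, hq, hqk, -⟩ := pvEntryOfH_some hk'
    have hmem := List.of_mem_filter hq
    simp only [hqk] at hmem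
    rw [← hek', hek] at hmem
    simp at hmem

theorem pvNodup_T (hits : List (Int × String)) : (pvT hits).Nodup :=
  (pvNodup_keys_T hits).of_map

theorem pvNodup_catEntries : ∀ (cs : List String) (rem : List (Int × String)),
    (pvCatEntries cs rem).Nodup := by
  intro cs
  induction cs with
  | nil => intro rem; simp [pvCatEntries]
  | cons c cs ih =>
    intro rem
    unfold pvCatEntries
    refine List.Nodup.append ?_ (ih _) ?_
    · cases rem.filter (fun p => PySem.Str.isIn (PySem.Str.lower c) p.2) <;> simp
    · intro e he₁ he₂
      obtain ⟨c', hc'⟩ := (pvMem_catEntries _ _ e).mp he₂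
      obtain ⟨hec', p, hp, hfm⟩ := pvEntryOf_some hc'
      have h1 := pvFm_some_isIn hfm
      have h2 := List.of_mem_filter hp
      cases hm : rem.filter (fun p => PySem.Str.isIn (PySem.Str.lower c) p.2) with
      | nil => rw [hm] at he₁; simp at he₁
      | cons q t =>
        rw [hm] at he₁
        simp at he₁
        have hec : e.2.1 = c := by rw [he₁]
        rw [hec] at hec'
        rw [← hec'] at h1
        simp only [h1, Bool.not_true] at h2
        exact absurd h2 (by simp)

-- fst components strictly increase
theorem pvH_pairwise {cats : List String} {rem : List (Int × String)}
    (h : rem.Pairwise (fun p q => p.1 < q.1)) :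
    (pvH cats rem).Pairwise (fun p q => p.1 < q.1) := by
  unfold pvH
  induction rem with
  | nil => simp
  | cons p rem ih =>
    rw [List.filterMap_cons]
    rw [List.pairwise_cons] at h
    cases hf : pvFm cats p.2 with
    | none => exact ih h.2
    | some c =>
      simp only [Option.map_some]
      rw [List.pairwise_cons]
      refine ⟨?_, ih h.2⟩
      intro q hq
      obtain ⟨r, hr, hrq⟩ := List.mem_filterMap.mp hq
      cases hg : pvFm cats r.2 with
      | none => rw [hg] at hrq; simp at hrq
      | some c' =>
        rw [hg] at hrq; simp at hrq
        have := h.1 r hr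
        rw [← hrq]
        exact this

theorem pvT_fst_mem {hits : List (Int × String)} {e : Int × String × Int}
    (he : e ∈ pvT hits) : ∃ q ∈ hits, e.1 = q.1 := by
  obtain ⟨k, hk⟩ := (pvMem_T hits e).mp he
  obtain ⟨-, q, hq, -, h⟩ := pvEntryOfH_some hk
  exact ⟨q, hq, h⟩

theorem pvT_pairwise : ∀ (hits : List (Int × String)),
    hits.Pairwise (fun p q => p.1 < q.1) →
    (pvT hits).Pairwise (fun (a b : Int × String × Int) => a.1 < b.1) := by
  intro hits
  induction hits using pvT_ind with
  | h0 => intro _; simp [pvT_nil]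
  | h1 i k t ih =>
    intro h
    rw [List.pairwise_cons] at h
    rw [pvT_cons, List.pairwise_cons]
    constructor
    · intro e he
      obtain ⟨q, hq, heq⟩ := pvT_fst_mem he
      have := h.1 q (List.mem_of_mem_filter hq)
      rw [heq]
      exact this
    · exact ih (h.2.filter _)

-- unrolling B's fold
theorem pvBLoop_foldl : ∀ (cs : List String) (rem : List (Int × String)) (e0 : List (Int × String × Int)),
    (cs.foldl pvBLoop (e0, rem)).1 = e0 ++ pvCatEntries cs rem := by
  intro cs
  induction cs with
  | nil => intro rem e0; simp [pvCatEntries]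
  | cons c cs ih =>
    intro rem e0
    rw [List.foldl_cons]
    unfold pvCatEntries
    show (cs.foldl pvBLoop (pvBLoop (e0, rem) c)).1 = _
    cases hm : rem.filter (fun p => PySem.Str.isIn (PySem.Str.lower c) p.2) with
    | nil =>
      have hb : pvBLoop (e0, rem) c
          = (e0, rem.filter (fun p => !PySem.Str.isIn (PySem.Str.lower c) p.2)) := by
        unfold pvBLoop
        dsimp only
        rw [hm]
        rfl
      rw [hb, ih]
      simp
    | cons p t =>
      have hb : pvBLoop (e0, rem) c
          = (e0 ++ [(p.1, c, ((p :: t).length : Int))],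
             rem.filter (fun p => !PySem.Str.isIn (PySem.Str.lower c) p.2)) := by
        unfold pvBLoop
        dsimp only
        rw [hm]
        simp
      rw [hb, ih]
      simp [List.append_assoc]

-- Set.ofList over a cons: first occurrence, then the rest with that key removed
theorem pvFoldl_add_mem {α : Type} [BEq α] [LawfulBEq α] :
    ∀ (l : List α) (s : List α) (k : α), k ∈ s →
      l.foldl PySem.Set.add s = (l.filter (fun x => !(x == k))).foldl PySem.Set.add s := by
  intro l
  induction l with
  | nil => intros; rfl
  | cons x l ih =>
    intro s k hk
    rw [List.filter_cons]
    by_cases hx : x = k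
    · subst hx
      simp only [beq_self_eq_true, Bool.not_true, Bool.false_eq_true, if_false]
      have hadd : PySem.Set.add s x = s := by
        simp [PySem.Set.add, List.contains_eq_mem, hk]
      rw [List.foldl_cons, hadd, ih s x hk]
    · simp only [show (!(x == k)) = true by simp [hx], if_true]
      rw [List.foldl_cons, List.foldl_cons]
      apply ih
      simp only [PySem.Set.add]
      split <;> simp [hk]

theorem pvFoldl_add_cons {α : Type} [BEq α] [LawfulBEq α] :
    ∀ (l : List α) (s : List α) (k : α), (∀ x ∈ l, x ≠ k) →
      l.foldl PySem.Set.add (k :: s) = k :: l.foldl PySem.Set.add s := by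
  intro l
  induction l with
  | nil => intros; rfl
  | cons x l ih =>
    intro s k hl
    have hx : x ≠ k := hl x List.mem_cons_self
    rw [List.foldl_cons, List.foldl_cons]
    have hadd : PySem.Set.add (k :: s) x = k :: PySem.Set.add s x := by
      simp only [PySem.Set.add, List.contains_eq_mem, List.mem_cons]
      simp [hx]
      split <;> simp
    rw [hadd]
    exact ih _ k (fun y hy => hl y (List.mem_cons_of_mem _ hy))

theorem pvSet_ofList_cons (k : String) (l : List String) :
    PySem.Set.ofList (k :: l) = k :: PySem.Set.ofList (l.filter (fun x => !(x == k))) := by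
  rw [PySem.Set.ofList_eq_foldl, PySem.Set.ofList_eq_foldl, List.foldl_cons]
  have h1 : PySem.Set.add ([] : List String) k = [k] := rfl
  rw [h1, pvFoldl_add_mem l [k] k (by simp), pvFoldl_add_cons]
  intro x hx
  have := List.of_mem_filter hx
  simpa using this

-- the grouped entries, projected, are exactly Counter's items
theorem pvT_map : ∀ (hits : List (Int × String)),
    (pvT hits).map (fun t => (t.2.1, t.2.2))
      = (PySem.Set.ofList (hits.map (·.2))).map
          (fun k => (k, ((hits.map (·.2)).count k : Int))) := by
  intro hits
  induction hits using pvT_ind with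
  | h0 => simp [pvT_nil]
  | h1 i k t ih =>
    rw [pvT_cons, List.map_cons, List.map_cons, pvSet_ofList_cons, List.map_cons]
    congr 1
    · simp [List.count_eq_countP, List.countP_eq_length_filter, List.filter_map,
        Function.comp_def, add_comm]
    · rw [ih]
      have hfm : (t.filter (fun q => !(q.2 == k))).map (·.2)
          = (t.map (·.2)).filter (fun x => !(x == k)) := by
        rw [List.filter_map]; rfl
      rw [hfm]
      apply List.map_congr_left
      intro k' hk'
      have hmem : k' ∈ (t.map (·.2)).filter (fun x => !(x == k)) :=
        (PySem.Set.mem_ofList _ k').mp hk'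
      have hne : k' ≠ k := by
        have := List.of_mem_filter hmem
        simpa using this
      congr 1
      rw [List.count_filter (by simp [hne]), List.count_cons]
      simp [Ne.symm hne]

-- ===== A-side lemmas (from the ports' shared shape) =====
theorem pv_zip_map {α β : Type} (f : α → β) (l : List α) :
    (l.map f).zip l = l.map (fun c => (f c, c)) := by
  induction l with
  | nil => rfl
  | cons x xs ih => simp only [List.map_cons, List.zip_cons_cons, ih]

theorem pvAInner_find? (counts : PySem.Dict String Int) (pairs : List (String × String)) (d : String) :
    pvAInner counts pairs d =
      match (pairs.find? (fun p => PySem.Str.isIn p.1 d)).map (·.2) with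
      | none => counts
      | some k => counts.modify k 0 (· + 1) := by
  induction pairs with
  | nil => rfl
  | cons p rest ih =>
    obtain ⟨lo, orig⟩ := p
    cases h : PySem.Str.isIn lo d
    · simp only [PySem.Str.isIn_eq] at h
      simp [pvAInner, List.find?, h, ih]
    · simp only [PySem.Str.isIn_eq] at h
      simp [pvAInner, List.find?, h]

theorem pv_foldl_optionModify (f : List (String × String) → Option String)
    (data : List (List (String × String))) (d : PySem.Dict String Int) :
    data.foldl (fun c x =>
        match f x with
        | none => c
        | some k => c.modify k 0 (· + 1)) d
      = ((data.map f).filterMap id).foldl (fun c k => c.modify k 0 (· + 1)) d := by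
  induction data generalizing d with
  | nil => rfl
  | cons x xs ih =>
    cases hx : f x <;> simp [List.foldl, hx, ih]

-- the zipped pair search is pvFm
theorem pvFind_pairs (cats : List String) (d : String) :
    ((cats.map (fun c => (PySem.Str.lower c, c))).find? (fun p => PySem.Str.isIn p.1 d)).map (·.2)
      = pvFm cats d := by
  rw [List.find?_map]
  unfold pvFm
  cases hf : cats.find? (fun c => PySem.Str.isIn (PySem.Str.lower c) d) <;>
    simp_all [Function.comp_def]

-- A's result: Counter of the first-match names
theorem pvA_eq (data : List (List (String × String))) (categories : List String) :
    process_bank_operations data categories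
      = (PySem.Dict.counter (data.filterMap (fun item =>
          pvFm categories (PySem.Str.lower (PySem.Dict.getD (PySem.Dict.mk item) "description" ""))))).items := by
  unfold process_bank_operations
  simp only [pv_zip_map, pvAInner_find?, pvFind_pairs]
  rw [pv_foldl_optionModify
    (fun item => pvFm categories (PySem.Str.lower (PySem.Dict.getD (PySem.Dict.mk item) "description" ""))),
    PySem.Dict.counter_eq_foldl]
  congr 1
  rw [List.filterMap_map]
  rfl

-- enumerate commutes with mapping the payload
theorem pvEnumerate_map {α β : Type} (f : α → β) :
    ∀ (l : List α) (s : Int),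
      (PySem.List.enumerate l s).map (fun p => (p.1, f p.2)) = PySem.List.enumerate (l.map f) s := by
  intro l
  induction l with
  | nil => intro s; rfl
  | cons x l ih =>
    intro s
    rw [List.map_cons, PySem.List.enumerate_cons, PySem.List.enumerate_cons, List.map_cons, ih]

-- names of the hit pairs over an enumeration = filterMap over the payloads
theorem pvH_map_snd (cats : List String) :
    ∀ (l : List String) (s : Int),
      (pvH cats (PySem.List.enumerate l s)).map (·.2) = l.filterMap (pvFm cats) := by
  intro l
  induction l with
  | nil => intro s; rfl
  | cons d l ih =>
    intro s
    rw [PySem.List.enumerate_cons]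
    unfold pvH
    rw [List.filterMap_cons, List.filterMap_cons]
    cases hf : pvFm cats d with
    | none => simpa using ih (s + 1)
    | some c => simp only [Option.map_some]; rw [List.map_cons]; simpa using ih (s + 1)

-- ===== VERDICT (by name: the statement is the Claim_ definition above) =====
theorem process_bank_operations_spec : Claim_equal_process_bank_operations := by
  intro data categories _
  unfold Spec_process_bank_operations
  rw [pvA_eq, PySem.Dict.items_counter]
  simp only [process_bank_operations_alt]
  rw [pvBLoop_foldl]
  simp only [List.nil_append]
  rw [pvEnumerate_map (fun item => PySem.Str.lower (PySem.Dict.getD (PySem.Dict.mk item) "description" "")) data 0]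
  set descs := data.map (fun item => PySem.Str.lower (PySem.Dict.getD (PySem.Dict.mk item) "description" "")) with hdescs
  set rem0 := PySem.List.enumerate descs 0 with hrem0
  have hpw : rem0.Pairwise (fun p q => p.1 < q.1) := PySem.List.pairwise_lt_enumerate descs 0
  have hperm : (pvT (pvH categories rem0)).Perm (pvCatEntries categories rem0) := by
    rw [List.perm_ext_iff_of_nodup (pvNodup_T _) (pvNodup_catEntries _ _)]
    intro e
    rw [pvMem_T, pvMem_catEntries]
    constructor
    · rintro ⟨k, hk⟩; exact ⟨k, by rw [pvEntryOf_eq_entryOfH]; exact hk⟩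
    · rintro ⟨c, hc⟩; exact ⟨c, by rw [← pvEntryOf_eq_entryOfH]; exact hc⟩
  rw [PySem.List.sorted_eq_of_perm_of_pairwise_lt _ _ _ hperm (pvT_pairwise _ (pvH_pairwise hpw))]
  rw [PySem.Dict.items_foldl_insert_fresh (pvT (pvH categories rem0))
    (fun t => t.2.1) (fun t => t.2.2) PySem.Dict.empty
    (fun a _ => PySem.Dict.contains_empty _) (pvNodup_keys_T _)]
  have : PySem.Dict.empty.items = ([] : List (String × Int)) := rfl
  rw [this, List.nil_append, pvT_map, pvH_map_snd]
  have : descs.filterMap (pvFm categories) = data.filterMap (fun item =>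
      pvFm categories (PySem.Str.lower (PySem.Dict.getD (PySem.Dict.mk item) "description" ""))) := by
    rw [hdescs, List.filterMap_map]; rfl
  rw [this]
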